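-- pv_equiv track=rewrite | github.com/swaroop516/MyNotes | InterviewPreparation/InterviewQuestions/Sky/Sky.py | promotional_discount
-- ===== SOURCE A (Python) =====
-- def promotional_discount(call_details):
--     """
--     call_details: Input list
--     This function returns the user with greatest cost of phone call.
--     """
--     discount = {}
--     for call in call_details:
--         if call[0] not in discount:
--             discount[call[0]] = call[2]
--         elif call[0] in discount and discount[call[0]]< call[2]:
--             discount[call[0]] = call[2]
--     return discount
-- ===== SOURCE B (Python) =====
-- def promotional_discount(call_details):
--     # Two-pass: group every cost by user, then take the max of each group.
--     groups = {}
--     for call in call_details: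
--         groups.setdefault(call[0], []).append(call[2])
--     return {key: max(values) for key, values in groups.items()}
-- ===== Notes on version B (the rewrite author's own statement) =====
-- stated objective: alternative
-- what changed: Replaces the incremental running-max dict update with a two-pass group-then-reduce: first build a dict of per-user cost lists, then take max of each group in a comprehension.
import Mathlib
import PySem

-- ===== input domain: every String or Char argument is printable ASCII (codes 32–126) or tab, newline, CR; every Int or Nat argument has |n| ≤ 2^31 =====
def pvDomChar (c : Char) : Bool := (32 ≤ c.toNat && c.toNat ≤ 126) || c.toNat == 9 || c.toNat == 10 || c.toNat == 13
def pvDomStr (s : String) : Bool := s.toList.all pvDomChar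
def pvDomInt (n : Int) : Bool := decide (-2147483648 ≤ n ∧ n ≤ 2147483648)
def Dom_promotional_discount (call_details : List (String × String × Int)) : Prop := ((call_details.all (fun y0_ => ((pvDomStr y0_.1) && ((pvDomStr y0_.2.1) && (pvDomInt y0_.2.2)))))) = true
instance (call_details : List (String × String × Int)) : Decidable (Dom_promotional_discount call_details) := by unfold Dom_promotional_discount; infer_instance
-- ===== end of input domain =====

-- B replaces A's incremental running-max dict with a two-pass group-then-reduce
-- (group costs per user, then take the max of each group); alternative decomposition, same cost.


-- ===== PORT A =====
-- one loop iteration of A: insert when the key is new, overwrite when the stored cost is smaller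
def pvStepA (d : PySem.Dict String Int) (c : String × String × Int) : PySem.Dict String Int :=
  if !(d.contains c.1) then d.insert c.1 c.2.2
  else if d.contains c.1 && decide (d.getD c.1 0 < c.2.2) then d.insert c.1 c.2.2
  else d

def promotional_discount (call_details : List (String × String × Int)) : List (String × Int) :=
  (call_details.foldl pvStepA PySem.Dict.empty).items

-- ===== PORT B =====
-- one grouping iteration of B: groups.setdefault(call[0], []).append(call[2])
def pvStepB (d : PySem.Dict String (List Int)) (c : String × String × Int) : PySem.Dict String (List Int) :=
  d.modify c.1 [] (fun vs => vs ++ [c.2.2])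

def promotional_discount_alt (call_details : List (String × String × Int)) : List (String × Int) :=
  -- {key: max(values) for key, values in groups.items()}; every group is nonempty so the
  -- 'none' (max of empty) branch is unreachable
  ((call_details.foldl pvStepB PySem.Dict.empty).items).map (fun p => (p.1, match PySem.List.max? p.2 (fun x => x) with
    | some m => m
    | none => 0))

-- ===== PRECONDITION & SPEC =====
def Spec_promotional_discount (call_details : List (String × String × Int)) (out : List (String × Int)) : Prop := out = promotional_discount_alt call_details
instance (call_details : List (String × String × Int)) (out : List (String × Int)) : Decidable (Spec_promotional_discount call_details out) := by unfold Spec_promotional_discount; infer_instance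

-- ===== CLAIM (what is proved, stated in full; the proofs are below) =====
def Claim_equal_promotional_discount : Prop := ∀ (call_details : List (String × String × Int)), Dom_promotional_discount call_details → Spec_promotional_discount call_details (promotional_discount call_details)

-- ===== LEMMAS AND PROOFS =====

-- running maximum over an optional accumulator (describes A's stored value)
def pvRunmax (o : Option Int) : List Int → Option Int
  | [] => o
  | v :: t => pvRunmax (some (match o with | none => v | some m => max m v)) t

theorem pvRunmax_cons (o : Option Int) (v : Int) (t : List Int) :
    pvRunmax o (v :: t) = pvRunmax (some (match o with | none => v | some m => max m v)) t := rfl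

theorem pvRunmax_some (t : List Int) : ∀ m : Int, pvRunmax (some m) t = some (t.foldl max m) := by
  induction t with
  | nil => intro m; rfl
  | cons v t ih => intro m; simp [pvRunmax, List.foldl, ih]

theorem pvA_get? (calls : List (String × String × Int)) :
    ∀ (d : PySem.Dict String Int) (k : String),
      (calls.foldl pvStepA d).get? k =
        pvRunmax (d.get? k) ((calls.filter (fun c => c.1 == k)).map (·.2.2)) := by
  induction calls with
  | nil => intro d k; rfl
  | cons c calls ih =>
    intro d k
    simp only [List.foldl_cons, List.filter_cons]
    by_cases hk : c.1 = k
    · subst hk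
      simp only [beq_self_eq_true, if_pos, List.map_cons]
      rw [ih]
      rw [pvRunmax_cons]
      congr 1
      by_cases hc : d.contains c.1
      · obtain ⟨m, hm⟩ : ∃ m, d.get? c.1 = some m := by
          rcases h : d.get? c.1 with _ | m
          · rw [PySem.Dict.get?_eq_none_iff_contains] at h; simp [h] at hc
          · exact ⟨m, rfl⟩
        have hgd : d.getD c.1 0 = m := PySem.Dict.getD_of_get?_eq_some d 0 hm
        by_cases hlt : d.getD c.1 0 < c.2.2
        · simp [pvStepA, hc, hlt, PySem.Dict.get?_insert_self, hm,
            max_eq_right (le_of_lt (hgd ▸ hlt))]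
        · have hmax : max m c.2.2 = m := max_eq_left (by rw [hgd] at hlt; omega)
          simp [pvStepA, hc, hlt, hm, hmax]
      · have hn : d.get? c.1 = none :=
          (PySem.Dict.get?_eq_none_iff_contains d c.1).mpr (by simpa using hc)
        simp [pvStepA, hc, PySem.Dict.get?_insert_self, hn]
    · have hne : ¬ (c.1 == k) = true := by simpa using hk
      simp only [hne, if_neg, Bool.false_eq_true, not_false_iff]
      rw [ih]
      congr 1
      unfold pvStepA
      split_ifs <;> simp [PySem.Dict.get?_insert_of_ne _ _ (Ne.symm hk)]

theorem pvA_keys (calls : List (String × String × Int)) :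
    ∀ (d : PySem.Dict String Int),
      (calls.foldl pvStepA d).keys = PySem.Set.update d.keys (calls.map (·.1)) := by
  induction calls with
  | nil => intro d; rfl
  | cons c calls ih =>
    intro d
    simp only [List.foldl_cons, List.map_cons, PySem.Set.update_cons]
    rw [ih]
    congr 1
    by_cases hc : d.contains c.1
    · have hmem : c.1 ∈ d.keys := (PySem.Dict.contains_iff_mem_keys d c.1).mp hc
      unfold pvStepA
      split_ifs <;> simp [PySem.Dict.keys_insert_of_contains d _ hc, PySem.Set.add_of_mem hmem]
    · have hmem : c.1 ∉ d.keys := fun h => hc ((PySem.Dict.contains_iff_mem_keys d c.1).mpr h)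
      simp [pvStepA, hc, PySem.Dict.keys_insert_of_not_contains d _ (by simpa using hc),
        PySem.Set.add_of_not_mem hmem]

theorem pvB_getD (calls : List (String × String × Int)) :
    ∀ (d : PySem.Dict String (List Int)) (k : String),
      (calls.foldl pvStepB d).getD k [] =
        d.getD k [] ++ (calls.filter (fun c => c.1 == k)).map (·.2.2) := by
  induction calls with
  | nil => intro d k; simp
  | cons c calls ih =>
    intro d k
    simp only [List.foldl_cons, List.filter_cons]
    rw [ih]
    by_cases hk : c.1 = k
    · subst hk
      simp [pvStepB]
    · have hne : ¬ (c.1 == k) = true := by simpa using hk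
      simp only [hne, if_neg, Bool.false_eq_true, not_false_iff]
      have : (pvStepB d c).getD k [] = d.getD k [] := by
        simp [pvStepB, PySem.Dict.getD_modify, Ne.symm hk]
      rw [this]

theorem pvB_keys (calls : List (String × String × Int)) :
    ∀ (d : PySem.Dict String (List Int)),
      (calls.foldl pvStepB d).keys = PySem.Set.update d.keys (calls.map (·.1)) := by
  induction calls with
  | nil => intro d; rfl
  | cons c calls ih =>
    intro d
    simp only [List.foldl_cons, List.map_cons, PySem.Set.update_cons]
    rw [ih]
    congr 1
    by_cases hc : d.contains c.1
    · have hmem : c.1 ∈ d.keys := (PySem.Dict.contains_iff_mem_keys d c.1).mp hc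
      simp [pvStepB, PySem.Dict.keys_modify, PySem.Dict.keys_insert_of_contains d _ hc, PySem.Set.add_of_mem hmem]
    · have hmem : c.1 ∉ d.keys := fun h => hc ((PySem.Dict.contains_iff_mem_keys d c.1).mpr h)
      simp [pvStepB, PySem.Dict.keys_modify, PySem.Dict.keys_insert_of_not_contains d _ (by simpa using hc), PySem.Set.add_of_not_mem hmem]

-- ===== VERDICT (by name: the statement is the Claim_ definition above) =====
theorem promotional_discount_spec : Claim_equal_promotional_discount := by
  intro calls _
  unfold Spec_promotional_discount promotional_discount promotional_discount_alt
  set dA := calls.foldl pvStepA PySem.Dict.empty with hdA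
  set dB := calls.foldl pvStepB PySem.Dict.empty with hdB
  have hkA : dA.keys = PySem.Set.ofList (calls.map (·.1)) := by
    rw [hdA, pvA_keys]; simp [PySem.Dict.keys_empty, PySem.Set.update_nil_left]
  have hkB : dB.keys = PySem.Set.ofList (calls.map (·.1)) := by
    rw [hdB, pvB_keys]; simp [PySem.Dict.keys_empty, PySem.Set.update_nil_left]
  have hndA : dA.keys.Nodup := hkA ▸ PySem.Set.nodup_ofList _
  have hndB : dB.keys.Nodup := hkB ▸ PySem.Set.nodup_ofList _
  rw [PySem.Dict.items_eq_map_keys dA hndA 0, PySem.Dict.items_eq_map_keys dB hndB [],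
    List.map_map, hkA, hkB]
  apply List.map_congr_left
  intro k hk
  have hkmem : k ∈ calls.map (·.1) := (PySem.Set.mem_ofList _ _).mp hk
  obtain ⟨c, hc, hck⟩ := List.mem_map.mp hkmem
  have hfil : c ∈ calls.filter (fun c => c.1 == k) :=
    List.mem_filter.mpr ⟨hc, by simp [hck]⟩
  obtain ⟨v, t, hvt⟩ : ∃ v t, (calls.filter (fun c => c.1 == k)).map (·.2.2) = v :: t := by
    rcases h : (calls.filter (fun c => c.1 == k)).map (·.2.2) with _ | ⟨v, t⟩
    · exact absurd (List.mem_map_of_mem (f := (·.2.2)) hfil) (by simp [h])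
    · exact ⟨v, t, h⟩
  have hA : dA.getD k 0 = t.foldl max v := by
    have : dA.get? k = some (t.foldl max v) := by
      rw [hdA, pvA_get?, PySem.Dict.get?_empty, hvt, pvRunmax, pvRunmax_some]
    exact PySem.Dict.getD_of_get?_eq_some _ 0 this
  have hB : dB.getD k [] = v :: t := by
    rw [hdB, pvB_getD, PySem.Dict.getD_empty, hvt]; rfl
  simp only [Function.comp, hA, hB, PySem.List.max?_id_cons]
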